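-- pv_equiv track=rewrite | github.com/bdambrosio/AllTheWorldAPlay | src/utils/Vibe.py | _extract_scenes_from_outline
-- ===== SOURCE A (Python) =====
-- from typing import Dict, List, Any, Optional
--
-- def _extract_scenes_from_outline(outline: str) -> List[str]:
--     """Extract scene descriptions from the story outline"""
--     scenes = []
--     lines = outline.split('\n')
--     current_scene = ""
--
--     for line in lines:
--         if line.strip().startswith('Scene ') and ':' in line:
--             if current_scene:
--                 scenes.append(current_scene.strip())
--             current_scene = line.strip()
--         elif current_scene and line.strip():
--             current_scene += " " + line.strip()
--
--     if current_scene: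
--         scenes.append(current_scene.strip())
--
--     # If no scenes found, create generic ones
--     if not scenes:
--         scenes = [
--             "Scene 1: The characters meet and discover their situation",
--             "Scene 2: Exploration and discovery of the environment",
--             "Scene 3: A challenge or conflict arises",
--             "Scene 4: Characters work together to overcome obstacles",
--             "Scene 5: Resolution and character growth"
--         ]
--
--     return scenes
-- ===== SOURCE B (Python) =====
-- from typing import List
--
--
-- def _extract_scenes_from_outline(outline: str) -> List[str]:
--     """Extract scene descriptions from the story outline"""
--
--     def _is_header(line: str) -> bool:
--         return line.strip().startswith('Scene ') and ':' in line
--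
--     lines = outline.split('\n')
--     n = len(lines)
--
--     # skip everything before the first scene header
--     i = 0
--     while i < n and not _is_header(lines[i]):
--         i += 1
--
--     # cut the remainder into [header .. next header) segments and join each
--     scenes = []
--     while i < n:
--         j = i + 1
--         while j < n and not _is_header(lines[j]):
--             j += 1
--         parts = [p for p in (line.strip() for line in lines[i:j]) if p]
--         scenes.append(' '.join(parts))
--         i = j
--
--     # If no scenes found, create generic ones
--     if not scenes:
--         scenes = [
--             "Scene 1: The characters meet and discover their situation",
--             "Scene 2: Exploration and discovery of the environment",
--             "Scene 3: A challenge or conflict arises",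
--             "Scene 4: Characters work together to overcome obstacles",
--             "Scene 5: Resolution and character growth"
--         ]
--
--     return scenes
-- ===== Notes on version B (the rewrite author's own statement) =====
-- stated objective: alternative
-- what changed: Replaced A's single accumulator loop (growing a current-scene string and flushing it on each new header) with a two-phase segment scan: skip lines before the first header, then repeatedly find the next header to delimit a segment and join its stripped non-empty lines in one pass per segment; the empty-result fallback is unchanged.
import Mathlib
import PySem

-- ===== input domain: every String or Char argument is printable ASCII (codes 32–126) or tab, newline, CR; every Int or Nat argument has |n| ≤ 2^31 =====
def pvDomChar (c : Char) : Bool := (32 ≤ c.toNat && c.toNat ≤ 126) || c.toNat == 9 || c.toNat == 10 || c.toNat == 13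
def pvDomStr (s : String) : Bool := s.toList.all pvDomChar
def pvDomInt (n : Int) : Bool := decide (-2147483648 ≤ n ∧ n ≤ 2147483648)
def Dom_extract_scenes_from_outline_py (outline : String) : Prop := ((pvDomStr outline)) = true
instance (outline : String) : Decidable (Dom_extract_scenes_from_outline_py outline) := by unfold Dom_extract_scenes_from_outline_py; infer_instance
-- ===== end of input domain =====

-- B replaces A's accumulator loop with a two-phase segment scan (skip to first header, then
-- join each header-delimited segment); same result, objective: alternative decomposition.

-- the hardcoded fallback list both Pythons share
def pvGenericScenes : List String :=
  [ "Scene 1: The characters meet and discover their situation",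
    "Scene 2: Exploration and discovery of the environment",
    "Scene 3: A challenge or conflict arises",
    "Scene 4: Characters work together to overcome obstacles",
    "Scene 5: Resolution and character growth" ]

-- ===== PORT A =====
-- loop body of A: state = (scenes, current_scene)
def pvStepA (st : List String × String) (line : String) : List String × String :=
  if PySem.Str.startswith (PySem.Str.strip line) "Scene " && PySem.Str.isIn ":" line then
    (if st.2 ≠ "" then st.1 ++ [PySem.Str.strip st.2] else st.1, PySem.Str.strip line)
  else if st.2 ≠ "" ∧ PySem.Str.strip line ≠ "" then
    (st.1, st.2 ++ " " ++ PySem.Str.strip line)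
  else st

def extract_scenes_from_outline_py (outline : String) : List String :=
  let lines := (PySem.Str.split? outline "\n").getD []   -- sep "\n" ≠ "", so split? is always some
  let st := lines.foldl pvStepA ([], "")
  let scenes := if st.2 ≠ "" then st.1 ++ [PySem.Str.strip st.2] else st.1
  if scenes = [] then pvGenericScenes else scenes

-- ===== PORT B =====
-- B's _is_header helper
def pvIsHeader (line : String) : Bool :=
  PySem.Str.startswith (PySem.Str.strip line) "Scene " && PySem.Str.isIn ":" line

-- B's outer while loop: each step takes one [header .. next header) segment lines[i:j]
-- (ported as head :: takeWhile over the suffix; the index scan j is the dropWhile)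
def pvScenesGo (lines : List String) : List String :=
  match lines with
  | [] => []
  | h :: rest =>
    PySem.Str.join " " (((h :: rest.takeWhile (fun l => !pvIsHeader l)).map PySem.Str.strip).filter (fun s => s ≠ ""))
      :: pvScenesGo (rest.dropWhile (fun l => !pvIsHeader l))
termination_by lines.length
decreasing_by simpa using Nat.lt_succ_of_le (List.length_dropWhile_le _ rest)

def extract_scenes_from_outline_py_alt (outline : String) : List String :=
  let lines := (PySem.Str.split? outline "\n").getD []
  -- B's first while loop: advance i past the non-header prefix
  let scenes := pvScenesGo (lines.dropWhile (fun l => !pvIsHeader l))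
  if scenes = [] then pvGenericScenes else scenes

-- ===== PRECONDITION & SPEC =====
def Spec_extract_scenes_from_outline_py (outline : String) (out : List String) : Prop := out = extract_scenes_from_outline_py_alt outline
instance (outline : String) (out : List String) : Decidable (Spec_extract_scenes_from_outline_py outline out) := by unfold Spec_extract_scenes_from_outline_py; infer_instance

-- ===== CLAIM (what is proved, stated in full; the proofs are below) =====
def Claim_equal_extract_scenes_from_outline_py : Prop := ∀ (outline : String), Dom_extract_scenes_from_outline_py outline → Spec_extract_scenes_from_outline_py outline (extract_scenes_from_outline_py outline)

-- ===== LEMMAS AND PROOFS =====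

-- a string with no leading and no trailing whitespace (the shape of A's current_scene)
def pvClean (s : String) : Prop :=
  (∀ c, s.toList.head? = some c → PySem.Chars.isspace c = false) ∧
  (∀ c, s.toList.getLast? = some c → PySem.Chars.isspace c = false)

-- A's final flush of current_scene
def pvFinish (st : List String × String) : List String :=
  if st.2 ≠ "" then st.1 ++ [PySem.Str.strip st.2] else st.1

theorem pv_str_ext (a b : String) (h : a.toList = b.toList) : a = b := by
  rw [← String.ofList_toList (s := a), ← String.ofList_toList (s := b), h]

theorem pv_ne_empty_iff (s : String) : s ≠ "" ↔ s.toList ≠ [] := by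
  constructor
  · intro h h2; exact h (pv_str_ext _ _ (by simp [h2]))
  · intro h h2; subst h2; simp at h

theorem pv_head_dropWhile {α} (p : α → Bool) (l : List α) (a : α)
    (h : (l.dropWhile p).head? = some a) : p a = false := by
  induction l with
  | nil => simp [List.dropWhile] at h
  | cons b t ih =>
    rw [List.dropWhile_cons] at h
    by_cases hb : p b = true
    · simp [hb] at h; exact ih h
    · simp [hb] at h; subst h; simpa using hb

theorem pv_head_of_prefix {α} (l1 l2 : List α) (h : l1 <+: l2) (hne : l1 ≠ []) :
    l1.head? = l2.head? := by
  obtain ⟨t, rfl⟩ := h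
  cases l1 with
  | nil => exact absurd rfl hne
  | cons a s => simp

theorem pv_clean_strip (s : String) : pvClean (PySem.Str.strip s) := by
  constructor
  · intro c hc
    rw [PySem.Str.toList_strip] at hc
    unfold PySem.Chars.strip PySem.Chars.rstrip PySem.Chars.lstrip at hc
    set t := List.dropWhile PySem.Chars.isspace s.toList with ht
    have hpre : (List.dropWhile PySem.Chars.isspace t.reverse).reverse <+: t := by
      have h2 := (List.dropWhile_suffix (l := t.reverse) (p := PySem.Chars.isspace)).reverse
      simpa using h2
    have hne : (List.dropWhile PySem.Chars.isspace t.reverse).reverse ≠ [] := by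
      intro h0; rw [h0] at hc; simp at hc
    rw [pv_head_of_prefix _ _ hpre hne] at hc
    exact pv_head_dropWhile _ _ _ hc
  · intro c hc
    rw [PySem.Str.toList_strip] at hc
    unfold PySem.Chars.strip PySem.Chars.rstrip PySem.Chars.lstrip at hc
    rw [List.getLast?_eq_head?_reverse, List.reverse_reverse] at hc
    exact pv_head_dropWhile _ _ _ hc

theorem pv_strip_of_clean (s : String) (h : pvClean s) : PySem.Str.strip s = s := by
  have hl : PySem.Chars.strip s.toList = s.toList := by
    unfold PySem.Chars.strip PySem.Chars.rstrip PySem.Chars.lstrip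
    have h1 : List.dropWhile PySem.Chars.isspace s.toList = s.toList := by
      cases hh : s.toList with
      | nil => simp
      | cons a t =>
        rw [List.dropWhile_cons]
        have := h.1 a (by rw [hh]; rfl)
        simp [this]
    rw [h1]
    have h2 : List.dropWhile PySem.Chars.isspace s.toList.reverse = s.toList.reverse := by
      cases hh : s.toList.reverse with
      | nil => simp
      | cons a t =>
        rw [List.dropWhile_cons]
        have hla : s.toList.getLast? = some a := by
          rw [List.getLast?_eq_head?_reverse, hh]; rfl
        have := h.2 a hla
        simp [this]
    rw [h2, List.reverse_reverse]
  unfold PySem.Str.strip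
  rw [hl, String.ofList_toList]

theorem pv_join_singleton (p : String) : PySem.Str.join " " [p] = p := by
  apply pv_str_ext
  rw [PySem.Str.toList_join]
  simp [PySem.Chars.join, List.intercalate]

theorem pv_join_cons_cons (p q : String) (rest : List String) :
    PySem.Str.join " " (p :: q :: rest) = p ++ " " ++ PySem.Str.join " " (q :: rest) := by
  apply pv_str_ext
  rw [PySem.Str.toList_join]
  simp only [List.map_cons]
  rw [PySem.Chars.join_cons_cons]
  simp [PySem.Str.toList_join]

theorem pv_join_append (pieces : List String) (p : String) (h : pieces ≠ []) :
    PySem.Str.join " " (pieces ++ [p]) = PySem.Str.join " " pieces ++ " " ++ p := by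
  induction pieces with
  | nil => exact absurd rfl h
  | cons q rest ih =>
    cases rest with
    | nil => simp only [List.cons_append, List.nil_append, pv_join_cons_cons, pv_join_singleton]
    | cons r rest' =>
      simp only [List.cons_append] at ih ⊢
      rw [pv_join_cons_cons q r (rest' ++ [p]), ih (by simp), pv_join_cons_cons q r rest']
      simp [String.append_assoc]

theorem pv_join_good (pieces : List String) (h : pieces ≠ [])
    (hg : ∀ p ∈ pieces, p ≠ "" ∧ pvClean p) :
    PySem.Str.join " " pieces ≠ "" ∧ pvClean (PySem.Str.join " " pieces) := by
  induction pieces with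
  | nil => exact absurd rfl h
  | cons p rest ih =>
    cases rest with
    | nil =>
      rw [pv_join_singleton]
      exact ⟨(hg p (by simp)).1, (hg p (by simp)).2⟩
    | cons q rest' =>
      have hJ := ih (by simp) (fun x hx => hg x (List.mem_cons_of_mem _ hx))
      have hp := hg p (by simp)
      have hpl : p.toList ≠ [] := (pv_ne_empty_iff p).mp hp.1
      have hJl : (PySem.Str.join " " (q :: rest')).toList ≠ [] := (pv_ne_empty_iff _).mp hJ.1
      rw [pv_join_cons_cons]
      have htl : (p ++ " " ++ PySem.Str.join " " (q :: rest')).toList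
          = p.toList ++ (" ".toList ++ (PySem.Str.join " " (q :: rest')).toList) := by
        simp [String.toList_append]
      constructor
      · rw [pv_ne_empty_iff, htl]
        simp [hpl]
      · constructor
        · intro c hc
          rw [htl, List.head?_append_of_ne_nil _ hpl] at hc
          exact hp.2.1 c hc
        · intro c hc
          rw [htl, List.getLast?_append_of_ne_nil _ (by simp), 
              List.getLast?_append_of_ne_nil _ hJl] at hc
          exact hJ.2.2 c hc

theorem pv_header_strip_ne (l : String) (h : pvIsHeader l = true) :
    PySem.Str.strip l ≠ "" := by
  unfold pvIsHeader at h
  have h1 := (Bool.and_eq_true _ _).mp h |>.1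
  rw [pv_ne_empty_iff]
  intro h0
  unfold PySem.Str.startswith at h1
  rw [PySem.Chars.startswith_iff, h0, List.prefix_nil] at h1
  simp at h1

theorem pvStepA_eq (st : List String × String) (line : String) :
    pvStepA st line =
      if pvIsHeader line = true then
        (if st.2 ≠ "" then st.1 ++ [PySem.Str.strip st.2] else st.1, PySem.Str.strip line)
      else if st.2 ≠ "" ∧ PySem.Str.strip line ≠ "" then
        (st.1, st.2 ++ " " ++ PySem.Str.strip line)
      else st := rfl

theorem pv_fold_scene (lines : List String) : ∀ (scenes pieces : List String), pieces ≠ [] →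
    (∀ p ∈ pieces, p ≠ "" ∧ pvClean p) →
    pvFinish (lines.foldl pvStepA (scenes, PySem.Str.join " " pieces))
      = scenes ++ (PySem.Str.join " " (pieces ++ ((lines.takeWhile (fun l => !pvIsHeader l)).map PySem.Str.strip).filter (fun s => s ≠ "")))
          :: pvScenesGo (lines.dropWhile (fun l => !pvIsHeader l)) := by
  induction lines with
  | nil =>
    intro scenes pieces hne hg
    have hgood := pv_join_good pieces hne hg
    simp only [List.foldl_nil, List.takeWhile_nil, List.dropWhile_nil, List.map_nil,
      List.filter_nil, List.append_nil, pvScenesGo]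
    unfold pvFinish
    rw [if_pos hgood.1, pv_strip_of_clean _ hgood.2]
  | cons l ls ih =>
    intro scenes pieces hne hg
    have hgood := pv_join_good pieces hne hg
    rw [List.foldl_cons, pvStepA_eq]
    by_cases hH : pvIsHeader l = true
    · rw [if_pos hH]
      simp only [if_pos hgood.1]
      rw [pv_strip_of_clean _ hgood.2]
      have hsl : PySem.Str.strip l ≠ "" := pv_header_strip_ne l hH
      have step : PySem.Str.strip l = PySem.Str.join " " [PySem.Str.strip l] :=
        (pv_join_singleton _).symm
      rw [step]
      rw [ih (scenes ++ [PySem.Str.join " " pieces]) [PySem.Str.strip l] (by simp)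
        (by intro p hp; simp at hp; subst hp; exact ⟨hsl, pv_clean_strip l⟩)]
      rw [List.takeWhile_cons, List.dropWhile_cons]
      simp only [hH, Bool.not_true, if_neg (by simp : ¬ (false = true))]
      rw [pvScenesGo]
      simp only [List.map_cons, List.filter_cons]
      rw [if_pos (by simpa using hsl)]
      simp [List.append_assoc]
    · rw [if_neg hH]
      rw [List.takeWhile_cons, List.dropWhile_cons]
      have hBn : (!pvIsHeader l) = true := by simp [hH]
      simp only [hBn, if_true]
      by_cases hs : PySem.Str.strip l = ""
      · rw [if_neg (by simp [hs])]
        rw [ih scenes pieces hne hg]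
        simp only [List.map_cons, List.filter_cons]
        rw [if_neg (by simp [hs])]
      · rw [if_pos ⟨hgood.1, hs⟩]
        have hcur : PySem.Str.join " " pieces ++ " " ++ PySem.Str.strip l
            = PySem.Str.join " " (pieces ++ [PySem.Str.strip l]) :=
          (pv_join_append pieces _ hne).symm
        rw [hcur]
        rw [ih scenes (pieces ++ [PySem.Str.strip l]) (by simp)
          (by intro p hp
              rcases List.mem_append.mp hp with h1 | h2
              · exact hg p h1
              · simp at h2; subst h2; exact ⟨hs, pv_clean_strip l⟩)]
        simp only [List.map_cons, List.filter_cons]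
        rw [if_pos (by simpa using hs)]
        simp [List.append_assoc]

theorem pv_fold_skip (lines : List String) : ∀ (scenes : List String),
    pvFinish (lines.foldl pvStepA (scenes, ""))
      = scenes ++ pvScenesGo (lines.dropWhile (fun l => !pvIsHeader l)) := by
  induction lines with
  | nil => intro scenes; simp [pvFinish, pvScenesGo]
  | cons l ls ih =>
    intro scenes
    rw [List.foldl_cons, pvStepA_eq]
    by_cases hH : pvIsHeader l = true
    · rw [if_pos hH]
      rw [if_neg (by simp : ¬ (("" : String) ≠ ""))]
      have hsl : PySem.Str.strip l ≠ "" := pv_header_strip_ne l hH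
      have step : PySem.Str.strip l = PySem.Str.join " " [PySem.Str.strip l] :=
        (pv_join_singleton _).symm
      rw [step]
      rw [pv_fold_scene ls scenes [PySem.Str.strip l] (by simp)
        (by intro p hp; simp at hp; subst hp; exact ⟨hsl, pv_clean_strip l⟩)]
      rw [List.dropWhile_cons]
      simp only [hH, Bool.not_true, if_neg (by simp : ¬ (false = true))]
      rw [pvScenesGo]
      simp only [List.map_cons, List.filter_cons]
      rw [if_pos (by simpa using hsl)]
      simp
    · rw [if_neg hH, if_neg (by simp)]
      rw [ih scenes]
      rw [List.dropWhile_cons]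
      simp [hH]
-- ===== VERDICT (by name: the statement is the Claim_ definition above) =====
theorem extract_scenes_from_outline_py_spec : Claim_equal_extract_scenes_from_outline_py := by
  intro outline _
  unfold Spec_extract_scenes_from_outline_py extract_scenes_from_outline_py extract_scenes_from_outline_py_alt
  have h := pv_fold_skip ((PySem.Str.split? outline "\n").getD []) []
  unfold pvFinish at h
  simp only [List.nil_append] at h
  simp only [h]
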